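-- pv_equiv track=rewrite | github.com/preetamozarde3/textgrid2csv | textgrid2csv.py | round_brackets
-- ===== SOURCE A (Python) =====
-- def round_brackets(string_to_process):
--     phenomena = ["ppb", "ppc", "ppl", "ppo"]
--     fls = []
--     flag = False
--     processed_string = ""
--     for char in string_to_process:
--         if char == "(":
--             flag = True
--         if char == ")" and flag:
--             flag = False
--             if processed_string not in phenomena:
--                 fls.append(processed_string)
--             processed_string = ""
--         if flag and char != "(":
--             processed_string = processed_string + char
--     return fls
-- ===== SOURCE B (Python) =====
-- def round_brackets(string_to_process):
--     phenomena = ("ppb", "ppc", "ppl", "ppo")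
--     fls = []
--     for seg in string_to_process.split(")")[:-1]:
--         _before, sep, inner = seg.partition("(")
--         if sep:
--             cap = inner.replace("(", "")
--             if cap not in phenomena:
--                 fls.append(cap)
--     return fls
-- ===== Notes on version B (the rewrite author's own statement) =====
-- stated objective: faster
-- what changed: Replaced the per-character flag/accumulator scanner (with quadratic string concatenation) by a segment pass: split on ')', drop the trailing segment, take each segment's part after its first '(' via partition, strip interior '(' with replace, and filter out the phenomena tokens.
import Mathlib
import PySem

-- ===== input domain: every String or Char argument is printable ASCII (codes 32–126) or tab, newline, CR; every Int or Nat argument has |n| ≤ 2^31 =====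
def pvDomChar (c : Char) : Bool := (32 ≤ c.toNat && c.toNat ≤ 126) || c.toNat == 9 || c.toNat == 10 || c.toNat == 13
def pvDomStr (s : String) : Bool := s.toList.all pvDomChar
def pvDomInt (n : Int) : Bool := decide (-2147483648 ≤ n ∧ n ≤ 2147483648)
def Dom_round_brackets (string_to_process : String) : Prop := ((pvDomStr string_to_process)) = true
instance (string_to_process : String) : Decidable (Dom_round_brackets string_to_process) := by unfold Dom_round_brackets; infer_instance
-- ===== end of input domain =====

-- B replaces A's per-character flag scanner by a split-on-')' segment pass (measured faster: A
-- concatenates strings char by char); return values proved equal on every input.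

-- ===== PORT A =====
-- the loop state (fls, flag, processed_string); processed_string kept as List Char, turned into
-- a String exactly where A compares/appends it
def pvStepA (st : List String × Bool × List Char) (char : Char) : List String × Bool × List Char :=
  let fls := st.1
  let flag := if char = '(' then true else st.2.1
  let proc := st.2.2
  let (fls, flag, proc) :=
    if char = ')' ∧ flag then
      (if String.ofList proc ∈ ["ppb", "ppc", "ppl", "ppo"] then fls else fls ++ [String.ofList proc],
       false, ([] : List Char))
    else (fls, flag, proc)
  if flag ∧ char ≠ '(' then (fls, flag, proc ++ [char]) else (fls, flag, proc)

def round_brackets (string_to_process : String) : List String :=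
  (string_to_process.toList.foldl pvStepA ([], false, [])).1

-- ===== PORT B =====
-- hand port of str.split(")") (single-character separator; exact: Python keeps empty pieces and a
-- trailing piece after the last separator)
def pvSplitClose : List Char → List (List Char)
  | [] => [[]]
  | c :: cs =>
    if c = ')' then [] :: pvSplitClose cs
    else
      match pvSplitClose cs with
      | [] => [[c]]          -- unreachable: pvSplitClose never returns []
      | h :: t => (c :: h) :: t

-- body of B's for-loop: seg.partition("(") (ported as dropWhile to the first '(': the part before
-- it is unused, sep nonempty iff a '(' was found) then inner.replace("(", "") (ported as filter,
-- exact: replace by "" deletes every occurrence)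
def pvStepB (fls : List String) (seg : List Char) : List String :=
  match seg.dropWhile (· ≠ '(') with
  | [] => fls
  | _ :: inner =>
    let cap := String.ofList (inner.filter (· ≠ '('))
    if cap ∈ ["ppb", "ppc", "ppl", "ppo"] then fls else fls ++ [cap]

def round_brackets_alt (string_to_process : String) : List String :=
  ((pvSplitClose string_to_process.toList).dropLast).foldl pvStepB []

-- ===== PRECONDITION & SPEC =====
def Spec_round_brackets (string_to_process : String) (out : List String) : Prop := out = round_brackets_alt string_to_process
instance (string_to_process : String) (out : List String) : Decidable (Spec_round_brackets string_to_process out) := by unfold Spec_round_brackets; infer_instance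

-- ===== CLAIM (what is proved, stated in full; the proofs are below) =====
def Claim_equal_round_brackets : Prop := ∀ (string_to_process : String), Dom_round_brackets string_to_process → Spec_round_brackets string_to_process (round_brackets string_to_process)

-- ===== LEMMAS AND PROOFS =====

-- capture emission: the phenomena check on a finished capture
def pvEmit (cap : List Char) : List String :=
  if String.ofList cap ∈ ["ppb", "ppc", "ppl", "ppo"] then [] else [String.ofList cap]

-- value of the rest of either run, given the current scanner state and the remaining segments
-- (the last segment is always dropped)
def pvRun : Bool → List Char → List (List Char) → List String
  | _, _, [] => []
  | _, _, [_] => []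
  | true, proc, seg :: rest@(_ :: _) =>
      pvEmit (proc ++ seg.filter (· ≠ '(')) ++ pvRun false [] rest
  | false, _, seg :: rest@(_ :: _) =>
      (match seg.dropWhile (· ≠ '(') with
       | [] => []
       | _ :: inner => pvEmit (inner.filter (· ≠ '('))) ++ pvRun false [] rest

theorem pvSplitClose_ne_nil (cs : List Char) : pvSplitClose cs ≠ [] := by
  cases cs with
  | nil => simp [pvSplitClose]
  | cons c cs =>
    simp only [pvSplitClose]
    split
    · simp
    · split <;> simp

theorem pvFoldB (segs : List (List Char)) (acc : List String) :
    segs.dropLast.foldl pvStepB acc = acc ++ pvRun false [] segs := by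
  induction segs generalizing acc with
  | nil => simp [pvRun]
  | cons seg rest ih =>
    cases rest with
    | nil => simp [pvRun]
    | cons seg2 t =>
      have hstep : pvStepB acc seg =
          acc ++ (match seg.dropWhile (· ≠ '(') with
                  | [] => []
                  | _ :: inner => pvEmit (inner.filter (· ≠ '('))) := by
        unfold pvStepB pvEmit
        cases seg.dropWhile (· ≠ '(') with
        | nil => simp
        | cons a inner => simp; split <;> simp
      have : (seg :: seg2 :: t).dropLast = seg :: (seg2 :: t).dropLast := by
        simp [List.dropLast]
      rw [this, List.foldl_cons, ih, hstep, pvRun, List.append_assoc]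

theorem pvFoldA (cs : List Char) (fls : List String) (flag : Bool) (proc : List Char)
    (h : flag = false → proc = []) :
    (cs.foldl pvStepA (fls, flag, proc)).1 = fls ++ pvRun flag proc (pvSplitClose cs) := by
  induction cs generalizing fls flag proc with
  | nil =>
    simp [pvSplitClose, pvRun]
  | cons c cs ih =>
    obtain ⟨h1, t, hsplit⟩ : ∃ h1 t, pvSplitClose cs = h1 :: t := by
      cases hx : pvSplitClose cs with
      | nil => exact absurd hx (pvSplitClose_ne_nil cs)
      | cons a b => exact ⟨a, b, rfl⟩
    rw [List.foldl_cons]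
    by_cases hc : c = ')'
    · subst hc
      cases flag with
      | false =>
        have hp := h rfl; subst hp
        have : pvStepA (fls, false, []) ')' = (fls, false, []) := by
          simp [pvStepA]
        rw [this, ih _ _ _ (fun _ => rfl)]
        simp only [pvSplitClose, hsplit]
        cases t <;> simp [pvRun, List.dropWhile]
      | true =>
        have : pvStepA (fls, true, proc) ')' =
            (fls ++ pvEmit proc, false, []) := by
          simp [pvStepA, pvEmit]
          split <;> simp
        rw [this, ih _ _ _ (fun _ => rfl)]
        simp only [pvSplitClose, hsplit]
        cases t <;> simp [pvRun, pvEmit, List.append_assoc]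
    · have hsplit' : pvSplitClose (c :: cs) = (c :: h1) :: t := by
        simp only [pvSplitClose, if_neg hc, hsplit]
      by_cases hop : c = '('
      · subst hop
        have : pvStepA (fls, flag, proc) '(' = (fls, true, proc) := by
          simp [pvStepA]
        rw [this, ih _ _ _ (by simp)]
        rw [hsplit', hsplit]
        cases t with
        | nil => simp [pvRun]
        | cons t0 ts =>
          cases flag with
          | true => simp [pvRun, List.filter]
          | false =>
            have hp := h rfl; subst hp
            simp [pvRun, List.dropWhile]
      · cases flag with
        | false =>
          have hp := h rfl; subst hp
          have : pvStepA (fls, false, []) c = (fls, false, []) := by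
            simp [pvStepA, hop, hc]
          rw [this, ih _ _ _ (fun _ => rfl)]
          rw [hsplit', hsplit]
          cases t with
          | nil => simp [pvRun]
          | cons t0 ts => simp [pvRun, List.dropWhile, hop]
        | true =>
          have : pvStepA (fls, true, proc) c = (fls, true, proc ++ [c]) := by
            simp [pvStepA, hop, hc]
          rw [this, ih _ _ _ (by simp)]
          rw [hsplit', hsplit]
          cases t with
          | nil => simp [pvRun]
          | cons t0 ts => simp [pvRun, List.filter, hop]

-- ===== VERDICT (by name: the statement is the Claim_ definition above) =====
theorem round_brackets_spec : Claim_equal_round_brackets := by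
  intro s _
  unfold Spec_round_brackets round_brackets round_brackets_alt
  rw [pvFoldA s.toList [] false [] (fun _ => rfl), pvFoldB]
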